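-- pv_equiv track=rewrite | github.com/abc-elearning-app/agent-builder | scripts/extract_school_emails.py | pick_best_email
-- ===== SOURCE A (Python) =====
-- PRIORITY_KEYWORDS = [
--     "principal", "contact", "admin", "office", "school",
--     "superintendent", "info", "secretary", "registrar",
-- ]
--
-- def pick_best_email(emails: list[str]) -> str:
--     """Pick the most likely school-contact email from a list."""
--     if not emails:
--         return None
--     for keyword in PRIORITY_KEYWORDS:
--         for email in emails:
--             if keyword in email.split("@")[0]:
--                 return email
--     return emails[0]
-- ===== SOURCE B (Python) =====
-- PRIORITY_KEYWORDS = [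
--     "principal", "contact", "admin", "office", "school",
--     "superintendent", "info", "secretary", "registrar",
-- ]
--
-- def _score(email):
--     local = email.split("@")[0]
--     for i, kw in enumerate(PRIORITY_KEYWORDS):
--         if kw in local:
--             return i
--     return len(PRIORITY_KEYWORDS)
--
-- def pick_best_email(emails):
--     """Pick the most likely school-contact email from a list."""
--     if not emails:
--         return None
--     return min(emails, key=_score)
-- ===== Notes on version B (the rewrite author's own statement) =====
-- stated objective: idiomatic
-- what changed: Replaces A's nested keyword-by-keyword scan with early return by a single stable min over the emails keyed by a per-email priority score (first matching keyword index, sentinel = number of keywords), which also subsumes the emails[0] fallback.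
import Mathlib
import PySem

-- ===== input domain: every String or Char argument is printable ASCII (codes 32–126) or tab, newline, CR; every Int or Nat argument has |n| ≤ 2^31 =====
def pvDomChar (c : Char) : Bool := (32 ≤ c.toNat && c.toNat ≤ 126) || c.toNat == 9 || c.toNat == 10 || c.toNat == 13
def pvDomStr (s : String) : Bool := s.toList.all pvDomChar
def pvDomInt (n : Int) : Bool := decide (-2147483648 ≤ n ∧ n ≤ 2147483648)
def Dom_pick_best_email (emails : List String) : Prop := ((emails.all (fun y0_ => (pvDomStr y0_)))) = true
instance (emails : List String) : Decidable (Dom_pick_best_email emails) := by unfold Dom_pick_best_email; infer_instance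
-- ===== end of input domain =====

-- B replaces A's nested keyword-then-email scan (early return, separate emails[0] fallback)
-- by one stable min over the emails keyed by a per-email priority score; idiomatic, same cost.


def PRIORITY_KEYWORDS : List String :=
  ["principal", "contact", "admin", "office", "school",
   "superintendent", "info", "secretary", "registrar"]

-- email.split("@")[0] (split with a non-empty separator always yields a non-empty list)
def pvLocal (e : String) : String := ((PySem.Str.split? e "@").getD []).headD ""

-- ===== PORT A =====
def pick_best_email (emails : List String) : Option String :=
  if emails.isEmpty then none
  else
    match PRIORITY_KEYWORDS.findSome?
        (fun kw => emails.find? (fun e => PySem.Str.isIn kw (pvLocal e))) with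
    | some e => some e
    | none => PySem.List.pyGet? emails 0

-- ===== PORT B =====
-- the 'for i, kw in enumerate(PRIORITY_KEYWORDS)' loop of _score, with early return
def pvScoreGo (i : Int) (kws : List String) (l : String) : Int :=
  match kws with
  | [] => (PRIORITY_KEYWORDS.length : Int)
  | kw :: t => if PySem.Str.isIn kw l then i else pvScoreGo (i + 1) t l

def pvScore (e : String) : Int := pvScoreGo 0 PRIORITY_KEYWORDS (pvLocal e)

def pick_best_email_alt (emails : List String) : Option String :=
  if emails.isEmpty then none
  else PySem.List.min? emails pvScore

-- ===== PRECONDITION & SPEC =====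
def Spec_pick_best_email (emails : List String) (out : Option String) : Prop := out = pick_best_email_alt emails
instance (emails : List String) (out : Option String) : Decidable (Spec_pick_best_email emails out) := by unfold Spec_pick_best_email; infer_instance

-- ===== CLAIM (what is proved, stated in full; the proofs are below) =====
def Claim_equal_pick_best_email : Prop := ∀ (emails : List String), Dom_pick_best_email emails → Spec_pick_best_email emails (pick_best_email emails)

-- ===== LEMMAS AND PROOFS =====

-- index of the first keyword of kws occurring in l, kws.length if none
def pvIdx (kws : List String) (l : String) : Int :=
  match kws with
  | [] => 0
  | kw :: t => if PySem.Str.isIn kw l then 0 else pvIdx t l + 1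

theorem pvIdx_nonneg (kws : List String) (l : String) : 0 ≤ pvIdx kws l := by
  induction kws with
  | nil => simp [pvIdx]
  | cons kw t ih => simp only [pvIdx]; split_ifs <;> omega

theorem pvScoreGo_eq (kws : List String) (l : String) :
    ∀ i : Int, i + kws.length = PRIORITY_KEYWORDS.length →
      pvScoreGo i kws l = i + pvIdx kws l := by
  induction kws with
  | nil =>
      intro i h
      simp only [pvScoreGo, pvIdx, List.length_nil] at h ⊢
      omega
  | cons kw t ih =>
      intro i h
      simp only [pvScoreGo, pvIdx]
      split_ifs with hm
      · omega
      · rw [ih (i + 1) (by simp only [List.length_cons] at h; push_cast at h ⊢; omega)]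
        ring

theorem pvScore_eq (e : String) : pvScore e = pvIdx PRIORITY_KEYWORDS (pvLocal e) := by
  simpa using pvScoreGo_eq PRIORITY_KEYWORDS (pvLocal e) 0 (by simp)

theorem min?_foldl_some {α : Type} (key : α → Int) (xs : List α) :
    ∀ a : α,
      List.foldl
        (fun acc x => match acc with
          | none => some x
          | some m => if key x < key m then some x else some m)
        (some a) xs
      = some (match PySem.List.min? xs key with
          | none => a
          | some b => if key b < key a then b else a) := by
  induction xs with
  | nil => intro a; simp [PySem.List.min?]
  | cons x t ih =>
      intro a
      have hx := ih x
      have hmin : PySem.List.min? (x :: t) key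
          = some (match PySem.List.min? t key with
              | none => x
              | some b => if key b < key x then b else x) := by
        simpa [PySem.List.min?] using hx
      simp only [List.foldl_cons]
      rw [hmin]
      by_cases h1 : key x < key a
      · simp only [h1, if_pos]
        rw [ih x]
        cases hr : PySem.List.min? t key with
        | none => simp [h1]
        | some b => simp only []; split_ifs <;> first | rfl | (exfalso; omega)
      · simp only [h1, if_false]
        rw [ih a]
        cases hr : PySem.List.min? t key with
        | none => simp [h1]
        | some b => simp only []; split_ifs <;> first | rfl | (exfalso; omega)

theorem min?_cons {α : Type} (key : α → Int) (x : α) (xs : List α) :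
    PySem.List.min? (x :: xs) key
      = some (match PySem.List.min? xs key with
          | none => x
          | some b => if key b < key x then b else x) := by
  simpa [PySem.List.min?] using min?_foldl_some key xs x

theorem min?_congr {α : Type} (k1 k2 : α → Int) :
    ∀ xs : List α, (∀ e ∈ xs, k1 e = k2 e) →
      PySem.List.min? xs k1 = PySem.List.min? xs k2 := by
  intro xs
  induction xs with
  | nil => intro _; simp [PySem.List.min?]
  | cons x t ih =>
      intro h
      rw [min?_cons, min?_cons, ih (fun e he => h e (List.mem_cons_of_mem _ he))]
      cases hr : PySem.List.min? t k2 with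
      | none => rfl
      | some b =>
          have hb : b ∈ t := PySem.List.min?_mem hr
          simp only []
          rw [h x (List.mem_cons_self), h b (List.mem_cons_of_mem _ hb)]

theorem min?_shift {α : Type} (k : α → Int) (c : Int) :
    ∀ xs : List α, PySem.List.min? xs (fun e => k e + c) = PySem.List.min? xs k := by
  intro xs
  induction xs with
  | nil => simp [PySem.List.min?]
  | cons x t ih =>
      rw [min?_cons, min?_cons, ih]
      cases hr : PySem.List.min? t k with
      | none => rfl
      | some b => simp only []; split_ifs <;> first | rfl | omega

theorem min?_first {α : Type} (p : α → Bool) (key : α → Int) :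
    ∀ (xs : List α) (e0 : α),
      (∀ e ∈ xs, (p e = true → key e = 0) ∧ (p e = false → 0 < key e)) →
      xs.find? p = some e0 →
      PySem.List.min? xs key = some e0 := by
  intro xs
  induction xs with
  | nil => intro e0 _ hf; simp at hf
  | cons x t ih =>
      intro e0 h hf
      rw [min?_cons]
      by_cases hp : p x = true
      · have hx0 : key x = 0 := (h x List.mem_cons_self).1 hp
        have he0 : e0 = x := by
          rw [List.find?_cons_of_pos hp] at hf; exact (Option.some_inj.mp hf).symm
        subst he0
        cases hr : PySem.List.min? t key with
        | none => rfl
        | some b =>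
            have hb : b ∈ t := PySem.List.min?_mem hr
            have hbk : 0 ≤ key b := by
              rcases (h b (List.mem_cons_of_mem _ hb)) with ⟨h1, h2⟩
              cases hpb : p b with
              | true => rw [h1 hpb]
              | false => exact le_of_lt (h2 hpb)
            simp only []
            rw [if_neg (by omega)]
      · have hpx : p x = false := by simpa using hp
        rw [List.find?_cons_of_neg (by simp [hpx])] at hf
        have hrec := ih e0 (fun e he => h e (List.mem_cons_of_mem _ he)) hf
        rw [hrec]
        have he0t : e0 ∈ t := List.mem_of_find?_eq_some hf
        have hpe0 : p e0 = true := List.find?_some hf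
        have he0k : key e0 = 0 := (h e0 (List.mem_cons_of_mem _ he0t)).1 hpe0
        have hxk : 0 < key x := (h x List.mem_cons_self).2 hpx
        simp only []
        rw [if_pos (by omega)]

theorem pick_main (kws : List String) (x : String) (rest : List String) :
    (match kws.findSome?
        (fun kw => (x :: rest).find? (fun e => PySem.Str.isIn kw (pvLocal e))) with
     | some e => some e
     | none => PySem.List.pyGet? (x :: rest) 0)
    = PySem.List.min? (x :: rest) (fun e => pvIdx kws (pvLocal e)) := by
  induction kws with
  | nil =>
      simp only [List.findSome?_nil]
      rw [min?_first (fun _ => true) _ (x :: rest) x (by simp [pvIdx])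
            (List.find?_cons_of_pos rfl)]
      simp [PySem.List.pyGet?, PySem.List.pyIdx?]
  | cons kw t ih =>
      rw [List.findSome?_cons]
      cases hf : (x :: rest).find? (fun e => PySem.Str.isIn kw (pvLocal e)) with
      | some e0 =>
          simp only []
          rw [min?_first (fun e => PySem.Str.isIn kw (pvLocal e)) _ (x :: rest) e0 ?_ hf]
          intro e _
          constructor
          · intro hp
            simp only [PySem.Str.isIn] at hp
            simp [pvIdx, hp]
          · intro hp
            simp only [PySem.Str.isIn] at hp
            simp only [pvIdx]
            rw [if_neg (by simp [hp])]
            have := pvIdx_nonneg t (pvLocal e)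
            omega
      | none =>
          simp only []
          rw [ih]
          have hnone := List.find?_eq_none.mp hf
          rw [min?_congr (fun e => pvIdx (kw :: t) (pvLocal e))
                (fun e => pvIdx t (pvLocal e) + 1) (x :: rest) ?_]
          · exact (min?_shift (fun e => pvIdx t (pvLocal e)) 1 (x :: rest)).symm
          · intro e he
            have hne : ¬ PySem.Str.isIn kw (pvLocal e) = true := hnone e he
            simp only [pvIdx]
            rw [if_neg (by simpa using hne)]

-- ===== VERDICT (by name: the statement is the Claim_ definition above) =====
theorem pick_best_email_spec : Claim_equal_pick_best_email := by
  intro emails _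
  unfold Spec_pick_best_email
  cases emails with
  | nil => rfl
  | cons x rest =>
      show pick_best_email (x :: rest) = pick_best_email_alt (x :: rest)
      unfold pick_best_email pick_best_email_alt
      simp only [List.isEmpty_cons, if_neg Bool.false_ne_true]
      rw [min?_congr pvScore (fun e => pvIdx PRIORITY_KEYWORDS (pvLocal e)) (x :: rest)
            (fun e _ => pvScore_eq e)]
      exact pick_main PRIORITY_KEYWORDS x rest
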